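-- pv_equiv track=rewrite | github.com/jpdotcom/Hackerrank-solutions | SubStringDiff(Medium)Solution.py | substringDiff
-- ===== SOURCE A (Python) =====
-- def substringDiff(k, s1, s2):
--     ans=0
--     for i in range(len(s1)):
--         chances=k
--         j=i
--         substr_len=0
--         while j<=len(s1)-1:
--             if s1[j]!=s2[j]:
--                 chances-=1
--             if chances<0:
--                 break
--             j+=1
--             substr_len+=1
--         ans=max(ans,substr_len)
--     return ans
-- ===== SOURCE B (Python) =====
-- def substringDiff(k, s1, s2):
--     n = len(s1)
--     mism = [s1[r] != s2[r] for r in range(n)]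
--     ans = 0
--     l = 0
--     cnt = 0
--     for r in range(n):
--         if mism[r]:
--             cnt += 1
--         while l <= r and cnt > k:
--             if mism[l]:
--                 cnt -= 1
--             l += 1
--         if r + 1 - l > ans:
--             ans = r + 1 - l
--     return ans
-- ===== Notes on version B (the rewrite author's own statement) =====
-- stated objective: faster
-- what changed: Replaced the per-start rescan (restarting the mismatch count at every i) with a single two-pointer sliding window over the aligned-mismatch array, so each position is visited O(1) times.
import Mathlib
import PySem

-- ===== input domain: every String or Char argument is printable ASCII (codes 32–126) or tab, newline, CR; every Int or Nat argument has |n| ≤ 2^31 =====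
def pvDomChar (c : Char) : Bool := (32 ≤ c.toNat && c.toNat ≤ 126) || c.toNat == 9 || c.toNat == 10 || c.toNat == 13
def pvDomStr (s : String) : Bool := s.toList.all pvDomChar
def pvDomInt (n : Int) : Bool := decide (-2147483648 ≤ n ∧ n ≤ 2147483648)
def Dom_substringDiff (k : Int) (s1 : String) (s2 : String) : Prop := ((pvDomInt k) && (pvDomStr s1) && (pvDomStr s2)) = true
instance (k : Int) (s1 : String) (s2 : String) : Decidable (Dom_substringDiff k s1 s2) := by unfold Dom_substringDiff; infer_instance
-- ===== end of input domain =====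

-- B replaces A's per-start rescan with a single two-pointer sliding window over the aligned mismatches (objective: faster); equal on Pre_ (len s1 <= len s2, exactly where the Python A returns).


-- ===== PORT A =====
-- inner 'while j <= len(s1)-1' loop of A; indexing via pyGetD (exact on Pre_: j < len a ≤ len b)
def pvInnerA (a b : List Char) (n : Nat) (chances : Int) (j : Nat) (len : Int) : Int :=
  if _h : j < n then
    let chances' := if PySem.List.pyGetD a (j : Int) ' ' != PySem.List.pyGetD b (j : Int) ' ' then chances - 1 else chances
    if chances' < 0 then len
    else pvInnerA a b n chances' (j + 1) (len + 1)
  else len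
termination_by n - j

def substringDiff (k : Int) (s1 : String) (s2 : String) : Int :=
  let a := s1.toList
  let b := s2.toList
  (List.range a.length).foldl (fun ans i => max ans (pvInnerA a b a.length k i 0)) 0

-- ===== PORT B =====
-- the 'while l <= r and cnt > k' loop of B
def pvShrink (mism : List Bool) (k : Int) (cnt : Int) (l r : Nat) : Int × Nat :=
  if _h : l ≤ r ∧ k < cnt then
    pvShrink mism k (if mism.getD l false then cnt - 1 else cnt) (l + 1) r
  else (cnt, l)
termination_by r + 1 - l

def substringDiff_alt (k : Int) (s1 : String) (s2 : String) : Int :=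
  let a := s1.toList
  let b := s2.toList
  let n := a.length
  let mism := (List.range n).map (fun (r : Nat) => PySem.List.pyGetD a (r : Int) ' ' != PySem.List.pyGetD b (r : Int) ' ')
  let st := (List.range n).foldl
    (fun (st : Int × Nat × Int) r =>
      let ans := st.1
      let l := st.2.1
      let cnt := st.2.2
      let cnt := if mism.getD r false then cnt + 1 else cnt
      let p := pvShrink mism k cnt l r
      let cnt := p.1
      let l := p.2
      (if (r : Int) + 1 - (l : Int) > ans then (r : Int) + 1 - (l : Int) else ans, l, cnt))
    (0, 0, 0)
  st.1

-- ===== PRECONDITION & SPEC =====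
-- Pre_ excludes exactly the inputs where Python A raises IndexError: A reads s2[j] for every j < len(s1) it visits, so it raises iff len(s2) < len(s1); B raises there too.
def Pre_substringDiff (k : Int) (s1 : String) (s2 : String) : Prop := s1.toList.length ≤ s2.toList.length
instance (k : Int) (s1 : String) (s2 : String) : Decidable (Pre_substringDiff k s1 s2) := by unfold Pre_substringDiff; infer_instance
def pvWitness_substringDiff : Int × String × String := (1, "abcd", "axcd")

def Spec_substringDiff (k : Int) (s1 : String) (s2 : String) (out : Int) : Prop := out = substringDiff_alt k s1 s2
instance (k : Int) (s1 : String) (s2 : String) (out : Int) : Decidable (Spec_substringDiff k s1 s2 out) := by unfold Spec_substringDiff; infer_instance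

-- ===== CLAIM (what is proved, stated in full; the proofs are below) =====
def Claim_equal_substringDiff : Prop := ∀ (k : Int) (s1 : String) (s2 : String), Dom_substringDiff k s1 s2 → Pre_substringDiff k s1 s2 → Spec_substringDiff k s1 s2 (substringDiff k s1 s2)

-- ===== LEMMAS AND PROOFS =====

-- the aligned-mismatch predicate both ports test
def pvBad (a b : List Char) (j : Nat) : Bool :=
  PySem.List.pyGetD a (j : Int) ' ' != PySem.List.pyGetD b (j : Int) ' '

-- number of aligned mismatches in [l, r)
def pvC (a b : List Char) (l r : Nat) : Nat := (List.range' l (r - l)).countP (pvBad a b)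

-- A's outer running max, and B's fold over the first r indices, as named terms (definitionally the ports' bodies)
def pvAans (a b : List Char) (k : Int) : Int :=
  (List.range a.length).foldl (fun ans i => max ans (pvInnerA a b a.length k i 0)) 0

def pvStepB (mism : List Bool) (k : Int) (st : Int × Nat × Int) (r : Nat) : Int × Nat × Int :=
  (if (r : Int) + 1 - ((pvShrink mism k (if mism.getD r false then st.2.2 + 1 else st.2.2) st.2.1 r).2 : Int) > st.1
     then (r : Int) + 1 - ((pvShrink mism k (if mism.getD r false then st.2.2 + 1 else st.2.2) st.2.1 r).2 : Int)
     else st.1,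
   (pvShrink mism k (if mism.getD r false then st.2.2 + 1 else st.2.2) st.2.1 r).2,
   (pvShrink mism k (if mism.getD r false then st.2.2 + 1 else st.2.2) st.2.1 r).1)

def pvBfold (a b : List Char) (k : Int) (r : Nat) : Int × Nat × Int :=
  (List.range r).foldl (pvStepB ((List.range a.length).map (fun j => pvBad a b j)) k) (0, 0, 0)

theorem pvC_self (a b : List Char) (l : Nat) : pvC a b l l = 0 := by
  simp [pvC]

theorem pvC_succ_right (a b : List Char) {l r : Nat} (h : l ≤ r) :
    pvC a b l (r + 1) = pvC a b l r + (if pvBad a b r then 1 else 0) := by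
  unfold pvC
  have h1 : r + 1 - l = (r - l) + 1 := by omega
  rw [h1, List.range'_concat, List.countP_append]
  have h2 : l + 1 * (r - l) = r := by omega
  rw [h2]
  simp [List.countP_cons]

theorem pvC_cons (a b : List Char) {l r : Nat} (h : l < r) :
    pvC a b l r = (if pvBad a b l then 1 else 0) + pvC a b (l + 1) r := by
  unfold pvC
  have h1 : r - l = (r - (l + 1)) + 1 := by omega
  rw [h1, List.range'_succ, List.countP_cons]
  split <;> omega

theorem pvC_mono_right (a b : List Char) {l r : Nat} (h : l ≤ r) :
    pvC a b l r ≤ pvC a b l (r + 1) := by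
  rw [pvC_succ_right a b h]; split <;> omega

theorem pvMismGetD (a b : List Char) {l : Nat} (h : l < a.length) :
    (((List.range a.length).map (fun j => pvBad a b j)).getD l false) = pvBad a b l := by
  simp [List.getD, h]

-- A's inner loop never returns less than the accumulator
theorem pvInnerA_ge_len (a b : List Char) (n : Nat) :
    ∀ (m : Nat) (ch len : Int) (j : Nat), n - j ≤ m → len ≤ pvInnerA a b n ch j len := by
  intro m
  induction m with
  | zero =>
    intro ch len j h
    rw [pvInnerA]
    have hj : ¬ j < n := by omega
    simp [hj]
  | succ m ih =>
    intro ch len j h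
    rw [pvInnerA]
    by_cases hj : j < n
    · rw [dif_pos hj]
      show len ≤ if (if pvBad a b j then ch - 1 else ch) < 0 then len
                 else pvInnerA a b n (if pvBad a b j then ch - 1 else ch) (j + 1) (len + 1)
      by_cases hb : pvBad a b j
      · rw [if_pos hb]
        split
        · exact le_refl len
        · have h2 := ih (ch - 1) (len + 1) (j + 1) (show n - (j + 1) ≤ m by omega)
          omega
      · rw [if_neg hb]
        split
        · exact le_refl len
        · have h2 := ih ch (len + 1) (j + 1) (show n - (j + 1) ≤ m by omega)
          omega
    · simp [hj]

-- A's inner loop reaches at least any admissible window length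
theorem pvInnerA_ge (a b : List Char) :
    ∀ (t j : Nat) (ch len : Int), j + t ≤ a.length → ((pvC a b j (j + t) : Int)) ≤ ch →
      len + t ≤ pvInnerA a b a.length ch j len := by
  intro t
  induction t with
  | zero =>
    intro j ch len _ _
    simpa using pvInnerA_ge_len a b a.length (a.length - j) ch len j le_rfl
  | succ t ih =>
    intro j ch len hjt hC
    have hj : j < a.length := by omega
    rw [pvInnerA, dif_pos hj]
    show len + ((t : Nat) + 1 : Nat) ≤
         if (if pvBad a b j then ch - 1 else ch) < 0 then len
         else pvInnerA a b a.length (if pvBad a b j then ch - 1 else ch) (j + 1) (len + 1)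
    have hcons := pvC_cons a b (show j < j + (t + 1) by omega)
    have hidx : j + (t + 1) = (j + 1) + t := by omega
    by_cases hb : pvBad a b j
    · rw [if_pos hb] at hcons
      rw [if_pos hb]
      have h0 : ¬ ((ch - 1) < 0) := by omega
      rw [if_neg h0]
      have hC' : ((pvC a b (j + 1) ((j + 1) + t) : Int)) ≤ ch - 1 := by
        rw [← hidx]; omega
      have := ih (j + 1) (ch - 1) (len + 1) (by omega) hC'
      push_cast at this ⊢
      omega
    · rw [if_neg hb] at hcons
      rw [if_neg hb]
      have h0 : ¬ (ch < 0) := by omega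
      rw [if_neg h0]
      have hC' : ((pvC a b (j + 1) ((j + 1) + t) : Int)) ≤ ch := by
        rw [← hidx]; omega
      have := ih (j + 1) ch (len + 1) (by omega) hC'
      push_cast at this ⊢
      omega

-- A's inner loop returns len + t for some admissible window of length t (for 0 ≤ ch)
theorem pvInnerA_exists (a b : List Char) :
    ∀ (m : Nat) (j : Nat) (ch len : Int), a.length - j ≤ m → 0 ≤ ch → j ≤ a.length →
      ∃ t : Nat, pvInnerA a b a.length ch j len = len + t ∧ j + t ≤ a.length ∧ ((pvC a b j (j + t) : Int)) ≤ ch := by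
  intro m
  induction m with
  | zero =>
    intro j ch len hm hch hj
    have hjn : ¬ j < a.length := by omega
    rw [pvInnerA, dif_neg hjn]
    exact ⟨0, by simp, by omega, by simp [pvC_self]; exact hch⟩
  | succ m ih =>
    intro j ch len hm hch hj
    by_cases hjn : j < a.length
    · rw [pvInnerA, dif_pos hjn]
      show ∃ t : Nat, (if (if pvBad a b j then ch - 1 else ch) < 0 then len
                       else pvInnerA a b a.length (if pvBad a b j then ch - 1 else ch) (j + 1) (len + 1))
                      = len + t ∧ j + t ≤ a.length ∧ ((pvC a b j (j + t) : Int)) ≤ ch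
      by_cases hb : pvBad a b j
      · rw [if_pos hb]
        by_cases h0 : ch - 1 < 0
        · rw [if_pos h0]
          exact ⟨0, by simp, by omega, by simp [pvC_self]; exact hch⟩
        · rw [if_neg h0]
          obtain ⟨t, hval, hle, hCt⟩ := ih (j + 1) (ch - 1) (len + 1) (by omega) (by omega) (by omega)
          refine ⟨t + 1, by rw [hval]; push_cast; ring, by omega, ?_⟩
          have hcons := pvC_cons a b (show j < j + (t + 1) by omega)
          rw [if_pos hb] at hcons
          have hidx : j + (t + 1) = (j + 1) + t := by omega
          rw [hidx] at hcons ⊢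
          omega
      · rw [if_neg hb]
        have h0 : ¬ (ch < 0) := by omega
        rw [if_neg h0]
        obtain ⟨t, hval, hle, hCt⟩ := ih (j + 1) ch (len + 1) (by omega) hch (by omega)
        refine ⟨t + 1, by rw [hval]; push_cast; ring, by omega, ?_⟩
        have hcons := pvC_cons a b (show j < j + (t + 1) by omega)
        rw [if_neg hb] at hcons
        have hidx : j + (t + 1) = (j + 1) + t := by omega
        rw [hidx] at hcons ⊢
        omega
    · rw [pvInnerA, dif_neg hjn]
      exact ⟨0, by simp, by omega, by simp [pvC_self]; exact hch⟩

-- characterisation of B's shrink loop (run on the true mismatch count of [l, r+1))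
theorem pvShrink_spec (a b : List Char) (k : Int) (hk : 0 ≤ k) (r : Nat) (hr : r < a.length) :
    ∀ (m l : Nat), r + 1 - l ≤ m → l ≤ r + 1 →
      ∃ l', pvShrink ((List.range a.length).map (fun j => pvBad a b j)) k ((pvC a b l (r + 1) : Int)) l r
              = ((pvC a b l' (r + 1) : Int), l')
        ∧ l ≤ l' ∧ l' ≤ r + 1 ∧ ((pvC a b l' (r + 1) : Int)) ≤ k
        ∧ ∀ x, l ≤ x → x < l' → k < ((pvC a b x (r + 1) : Int)) := by
  intro m
  induction m with
  | zero =>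
    intro l hm hl
    have hl' : l = r + 1 := by omega
    have hg : ¬ (l ≤ r ∧ k < ((pvC a b l (r + 1) : Int))) := by
      intro ⟨h1, _⟩; omega
    rw [pvShrink, dif_neg hg]
    subst hl'
    exact ⟨r + 1, rfl, le_rfl, le_rfl, by simp [pvC_self]; exact hk, by omega⟩
  | succ m ih =>
    intro l hm hl
    by_cases hg : l ≤ r ∧ k < ((pvC a b l (r + 1) : Int))
    · rw [pvShrink, dif_pos hg]
      have hln : l < a.length := by omega
      rw [pvMismGetD a b hln]
      have hcons := pvC_cons a b (show l < r + 1 by omega)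
      have harg : (if pvBad a b l then ((pvC a b l (r + 1) : Int)) - 1 else ((pvC a b l (r + 1) : Int)))
                  = ((pvC a b (l + 1) (r + 1) : Int)) := by
        by_cases hb : pvBad a b l
        · rw [if_pos hb] at hcons; rw [if_pos hb]; omega
        · rw [if_neg hb] at hcons; rw [if_neg hb]; omega
      rw [harg]
      obtain ⟨l', hval, hge, hle', hk', hmin⟩ := ih (l + 1) (by omega) (by omega)
      refine ⟨l', hval, by omega, hle', hk', ?_⟩
      intro x hx1 hx2
      rcases Nat.eq_or_lt_of_le hx1 with hx | hx
      · subst hx; exact hg.2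
      · exact hmin x (by omega) hx2
    · rw [pvShrink, dif_neg hg]
      refine ⟨l, rfl, le_rfl, hl, ?_, by omega⟩
      by_cases hlr : l ≤ r
      · have h2 : ¬ k < ((pvC a b l (r + 1) : Int)) := fun h => hg ⟨hlr, h⟩
        omega
      · have : l = r + 1 := by omega
        subst this
        simp [pvC_self]; exact hk

-- one step of B's fold
theorem pvBfold_succ (a b : List Char) (k : Int) (r : Nat) :
    pvBfold a b k (r + 1) = pvStepB ((List.range a.length).map (fun j => pvBad a b j)) k (pvBfold a b k r) r := by
  unfold pvBfold
  rw [List.range_succ, List.foldl_append]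
  rfl

-- the sliding-window invariant (k ≥ 0)
theorem pvB_inv (a b : List Char) (k : Int) (hk : 0 ≤ k) :
    ∀ r, r ≤ a.length →
      ∃ ans l, pvBfold a b k r = (ans, l, ((pvC a b l r : Int)))
        ∧ l ≤ r ∧ ((pvC a b l r : Int)) ≤ k
        ∧ (∀ x, x < l → k < ((pvC a b x r : Int)))
        ∧ 0 ≤ ans ∧ ans ≤ pvAans a b k
        ∧ (∀ i t : Nat, i + t ≤ r → ((pvC a b i (i + t) : Int)) ≤ k → (t : Int) ≤ ans) := by
  intro r
  induction r with
  | zero =>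
    intro _
    refine ⟨0, 0, by simp [pvBfold, pvC_self], le_rfl, by simp [pvC_self]; exact hk, by omega, le_rfl, ?_, ?_⟩
    · exact (PySem.List.le_foldl_max_int (List.range a.length) (fun i => pvInnerA a b a.length k i 0) 0).1
    · intro i t h _
      have : t = 0 := by omega
      simp [this]
  | succ r ih =>
    intro hr1
    obtain ⟨ans, l, hfold, hl, _hcnt, hmin, hans0, hansA, hP2⟩ := ih (by omega)
    have hrn : r < a.length := by omega
    have hc1 : (if ((List.range a.length).map (fun j => pvBad a b j)).getD r false
                then ((pvC a b l r : Int)) + 1 else ((pvC a b l r : Int)))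
               = ((pvC a b l (r + 1) : Int)) := by
      rw [pvMismGetD a b hrn]
      have := pvC_succ_right a b hl
      by_cases hb : pvBad a b r
      · rw [if_pos hb] at this ⊢; omega
      · rw [if_neg hb] at this ⊢; omega
    obtain ⟨l', hsh, hll', hl'r, hk', hmin'⟩ :=
      pvShrink_spec a b k hk r hrn (r + 1 - l) l le_rfl (by omega)
    have hstep : pvStepB ((List.range a.length).map (fun j => pvBad a b j)) k (ans, l, ((pvC a b l r : Int))) r
        = (if (r : Int) + 1 - (l' : Int) > ans then (r : Int) + 1 - (l' : Int) else ans, l', ((pvC a b l' (r + 1) : Int))) := by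
      unfold pvStepB
      dsimp only
      rw [hc1, hsh]
    -- new minimality, used twice below
    have hminN : ∀ x, x < l' → k < ((pvC a b x (r + 1) : Int)) := by
      intro x hx
      by_cases hxl : x < l
      · have h1 := hmin x hxl
        have h2 := pvC_mono_right a b (show x ≤ r by omega)
        omega
      · exact hmin' x (by omega) hx
    refine ⟨_, l', by rw [pvBfold_succ, hfold, hstep], by omega, hk', hminN, ?_, ?_, ?_⟩
    · split <;> omega
    · split
      · rename_i h
        have hl'le : l' ≤ r := by omega
        have hwin : ((pvC a b l' (l' + (r + 1 - l')) : Int)) ≤ k := by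
          have : l' + (r + 1 - l') = r + 1 := by omega
          rw [this]; exact hk'
        have hge := pvInnerA_ge a b (r + 1 - l') l' k 0 (by omega) hwin
        have hA0 : pvInnerA a b a.length k l' 0 ≤ pvAans a b k := by
          unfold pvAans
          exact (PySem.List.le_foldl_max_int (List.range a.length)
            (fun i => pvInnerA a b a.length k i 0) 0).2 l' (List.mem_range.mpr (by omega))
        omega
      · exact hansA
    · intro i t hit hCt
      by_cases hcase : i + t ≤ r
      · have := hP2 i t hcase hCt
        split <;> omega
      · have hit' : i + t = r + 1 := by omega
        have hil' : l' ≤ i := by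
          by_contra hcon
          have := hminN i (by omega)
          rw [hit'] at hCt
          omega
        split <;> omega

-- k < 0: A's inner loop exits immediately
theorem pvInnerA_neg (a b : List Char) (k : Int) (hk : k < 0) (i : Nat) (hi : i < a.length) :
    pvInnerA a b a.length k i 0 = 0 := by
  rw [pvInnerA, dif_pos hi]
  show (if (if pvBad a b i then k - 1 else k) < 0 then (0 : Int)
        else pvInnerA a b a.length (if pvBad a b i then k - 1 else k) (i + 1) (0 + 1)) = 0
  have : (if pvBad a b i then k - 1 else k) < 0 := by split <;> omega
  rw [if_pos this]

theorem pvFoldlMaxZero (f : Nat → Int) :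
    ∀ (L : List Nat), (∀ i ∈ L, f i = 0) → L.foldl (fun ans i => max ans (f i)) 0 = 0 := by
  intro L
  induction L with
  | nil => intro _; rfl
  | cons x xs ih =>
    intro h
    have hx : f x = 0 := h x (by simp)
    simp only [List.foldl_cons, hx, max_self]
    exact ih (fun i hi => h i (by simp [hi]))

theorem pvAans_neg (a b : List Char) (k : Int) (hk : k < 0) : pvAans a b k = 0 := by
  unfold pvAans
  exact pvFoldlMaxZero _ _ (fun i hi => pvInnerA_neg a b k hk i (List.mem_range.mp hi))

theorem pvBfold_neg (a b : List Char) (k : Int) (hk : k < 0) :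
    ∀ r, r ≤ a.length → pvBfold a b k r = (0, r, 0) := by
  intro r
  induction r with
  | zero => intro _; simp [pvBfold]
  | succ r ih =>
    intro hr
    have hrn : r < a.length := by omega
    rw [pvBfold_succ, ih (by omega)]
    unfold pvStepB
    dsimp only
    rw [pvMismGetD a b hrn]
    by_cases hb : pvBad a b r
    · rw [if_pos hb]
      rw [pvShrink, dif_pos ⟨le_rfl, by omega⟩]
      rw [pvMismGetD a b hrn, if_pos hb]
      rw [pvShrink, dif_neg (by omega)]
      dsimp only
      rw [if_neg (by push_cast; omega)]
      norm_num
    · rw [if_neg hb]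
      rw [pvShrink, dif_pos ⟨le_rfl, by omega⟩]
      rw [pvMismGetD a b hrn, if_neg hb]
      rw [pvShrink, dif_neg (by omega)]
      dsimp only
      rw [if_neg (by push_cast; omega)]

theorem pvMain (a b : List Char) (k : Int) : pvAans a b k = (pvBfold a b k a.length).1 := by
  by_cases hk : 0 ≤ k
  · obtain ⟨ans, l, hfold, _hl, _hcnt, _hmin, hans0, hansA, hP2⟩ := pvB_inv a b k hk a.length le_rfl
    rw [hfold]
    dsimp only
    have hAeq : pvAans a b k
        = ((List.range a.length).map (fun i => pvInnerA a b a.length k i 0)).foldl max 0 := by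
      unfold pvAans; rw [List.foldl_map]
    rcases PySem.List.foldl_max_mem ((List.range a.length).map (fun i => pvInnerA a b a.length k i 0)) 0 with h0 | hmem
    · rw [hAeq] at hansA ⊢
      rw [h0] at hansA ⊢
      omega
    · obtain ⟨i, hi, hgA⟩ := List.mem_map.mp hmem
      obtain ⟨t, hval, hwin, hCt⟩ := pvInnerA_exists a b (a.length - i) i k 0 le_rfl hk (le_of_lt (List.mem_range.mp hi))
      have h1 := hP2 i t hwin hCt
      rw [hval] at hgA
      rw [hAeq, ← hgA]
      omega
  · have hkneg : k < 0 := by omega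
    rw [pvAans_neg a b k hkneg, pvBfold_neg a b k hkneg a.length le_rfl]

-- ===== VERDICT (by name: the statement is the Claim_ definition above) =====
theorem substringDiff_spec : Claim_equal_substringDiff := by
  intro k s1 s2 _ _
  show substringDiff k s1 s2 = substringDiff_alt k s1 s2
  have hA : substringDiff k s1 s2 = pvAans s1.toList s2.toList k := rfl
  have hB : substringDiff_alt k s1 s2 = (pvBfold s1.toList s2.toList k s1.toList.length).1 := by
    unfold substringDiff_alt pvBfold pvStepB pvBad
    rfl
  rw [hA, hB]
  exact pvMain s1.toList s2.toList k
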